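-- pv_equiv track=rewrite | github.com/wangshufeilj/ailuanqibazao | scripts/generate_lex447_rainbow_html.py | gap_ranges
-- ===== SOURCE A (Python) =====
-- def gap_ranges(n: int, merged: list[tuple[int, int]]) -> list[tuple[int, int]]:
--     if not merged:
--         return [(0, n)] if n > 0 else []
--     gaps: list[tuple[int, int]] = []
--     pos = 0
--     for s, e in merged:
--         if pos < s:
--             gaps.append((pos, s))
--         pos = max(pos, e)
--     if pos < n:
--         gaps.append((pos, n))
--     return gaps
-- ===== SOURCE B (Python) =====
-- def gap_ranges(n: int, merged: list[tuple[int, int]]) -> list[tuple[int, int]]: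
--     # prefix-max table: pm[i] = running max of ends before interval i (pm[0] = 0)
--     pm = [0]
--     for _s, e in merged:
--         pm.append(max(pm[-1], e))
--     gaps = [(p, s) for (s, _e), p in zip(merged, pm) if p < s]
--     if pm[-1] < n:
--         gaps.append((pm[-1], n))
--     return gaps
-- ===== Notes on version B (the rewrite author's own statement) =====
-- stated objective: alternative
-- what changed: B first builds a prefix-max table of interval ends, then derives the gaps by a zip/filter pass over merged paired with that table, with one uniform final-gap check that also covers the empty-merged case (no special guard); A interleaves gap emission and the running max in a single accumulator loop with an explicit empty-list guard.
import Mathlib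
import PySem

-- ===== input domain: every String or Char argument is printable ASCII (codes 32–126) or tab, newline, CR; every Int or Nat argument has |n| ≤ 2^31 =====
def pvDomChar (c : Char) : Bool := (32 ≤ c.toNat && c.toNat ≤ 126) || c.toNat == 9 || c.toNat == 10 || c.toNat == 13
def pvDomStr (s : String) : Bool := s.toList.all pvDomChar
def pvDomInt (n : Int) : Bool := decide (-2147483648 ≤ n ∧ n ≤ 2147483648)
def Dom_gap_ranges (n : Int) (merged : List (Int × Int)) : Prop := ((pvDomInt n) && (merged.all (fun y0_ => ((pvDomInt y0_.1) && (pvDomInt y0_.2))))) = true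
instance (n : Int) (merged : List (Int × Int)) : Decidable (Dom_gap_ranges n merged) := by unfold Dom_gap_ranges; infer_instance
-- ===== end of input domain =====

-- B replaces A's single accumulator loop (explicit empty guard + interleaved gap emission)
-- by a prefix-max table of ends followed by a zip/filter pass; same result, same O(n) cost.


-- ===== PORT A =====
def gap_ranges (n : Int) (merged : List (Int × Int)) : List (Int × Int) :=
  if merged = [] then (if n > 0 then [(0, n)] else []) else
    let st := merged.foldl
      (fun (st : List (Int × Int) × Int) p =>
        let gaps := if st.2 < p.1 then st.1 ++ [(st.2, p.1)] else st.1
        (gaps, max st.2 p.2)) ([], 0)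
    if st.2 < n then st.1 ++ [(st.2, n)] else st.1

-- ===== PORT B =====
-- the prefix-max table: pm[0] = cur, then append max(pm[-1], e) for each (s, e)
def pvPrefixMax (cur : Int) : List (Int × Int) → List Int
  | [] => [cur]
  | p :: rest => cur :: pvPrefixMax (max cur p.2) rest

def gap_ranges_alt (n : Int) (merged : List (Int × Int)) : List (Int × Int) :=
  let pm := pvPrefixMax 0 merged
  let gaps := (merged.zip pm).filterMap
    (fun q => if q.2 < q.1.1 then some (q.2, q.1.1) else none)
  let last := pm.getLastD 0   -- pm[-1]; pm is never empty so the default is unreachable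
  if last < n then gaps ++ [(last, n)] else gaps

-- ===== PRECONDITION & SPEC =====
def Spec_gap_ranges (n : Int) (merged : List (Int × Int)) (out : List (Int × Int)) : Prop := out = gap_ranges_alt n merged
instance (n : Int) (merged : List (Int × Int)) (out : List (Int × Int)) : Decidable (Spec_gap_ranges n merged out) := by unfold Spec_gap_ranges; infer_instance

-- ===== CLAIM (what is proved, stated in full; the proofs are below) =====
def Claim_equal_gap_ranges : Prop := ∀ (n : Int) (merged : List (Int × Int)), Dom_gap_ranges n merged → Spec_gap_ranges n merged (gap_ranges n merged)

-- ===== LEMMAS AND PROOFS =====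

def pvGapsB (pos : Int) (merged : List (Int × Int)) : List (Int × Int) :=
  (merged.zip (pvPrefixMax pos merged)).filterMap
    (fun q => if q.2 < q.1.1 then some (q.2, q.1.1) else none)

def pvFoldA (g : List (Int × Int)) (pos : Int) (merged : List (Int × Int)) :
    List (Int × Int) × Int :=
  merged.foldl
    (fun (st : List (Int × Int) × Int) p =>
      let gaps := if st.2 < p.1 then st.1 ++ [(st.2, p.1)] else st.1
      (gaps, max st.2 p.2)) (g, pos)

lemma pvFoldA_eq (merged : List (Int × Int)) : ∀ (g : List (Int × Int)) (pos : Int),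
    pvFoldA g pos merged = (g ++ pvGapsB pos merged, (pvPrefixMax pos merged).getLastD 0) := by
  induction merged with
  | nil => intro g pos; simp [pvFoldA, pvGapsB, pvPrefixMax]
  | cons p rest ih =>
    intro g pos
    simp only [pvFoldA, pvGapsB, pvPrefixMax, List.foldl, List.zip_cons_cons,
      List.filterMap_cons]
    have h1 := ih (if pos < p.1 then g ++ [(pos, p.1)] else g) (max pos p.2)
    simp only [pvFoldA] at h1
    rw [h1]
    have hne : pvPrefixMax (max pos p.2) rest ≠ [] := by
      cases rest <;> simp [pvPrefixMax]
    have h2 : (pos :: pvPrefixMax (max pos p.2) rest).getLastD 0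
        = (pvPrefixMax (max pos p.2) rest).getLastD 0 := by
      cases rest <;> simp [pvPrefixMax]
    rw [h2]
    split <;> simp [pvGapsB]

theorem gap_ranges_eq_alt (n : Int) (merged : List (Int × Int)) :
    gap_ranges n merged = gap_ranges_alt n merged := by
  cases merged with
  | nil =>
    simp only [gap_ranges, gap_ranges_alt, pvPrefixMax]
    by_cases h : 0 < n
    · simp [h]
    · simp [h]
  | cons p rest =>
    simp only [gap_ranges, gap_ranges_alt, reduceCtorEq, if_false]
    have h := pvFoldA_eq (p :: rest) [] 0
    simp only [pvFoldA] at h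
    rw [h]
    simp [pvGapsB]

-- ===== VERDICT (by name: the statement is the Claim_ definition above) =====
theorem gap_ranges_spec : Claim_equal_gap_ranges := by
  intro n merged _
  unfold Spec_gap_ranges
  exact gap_ranges_eq_alt n merged
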